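-- pv_equiv track=rewrite | github.com/snithish/dal-obscura | src/dal_obscura/masking/default.py | _apply_nested_mask
-- ===== SOURCE A (Python) =====
-- def _apply_nested_mask(path: str, expr: str) -> str:
--     parts = path.split(".")
--     if len(parts) == 1:
--         return expr
--     updated = expr
--     for depth in range(len(parts) - 1, 0, -1):
--         parent = ".".join(parts[:depth])
--         field = parts[depth]
--         updated = f'struct_update({parent}, "{field}" := {updated})'
--     return updated
-- ===== SOURCE B (Python) =====
-- def _apply_nested_mask(path: str, expr: str) -> str:
--     # One forward pass: emit each opening "struct_update(parent, "field" := "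
--     # segment while extending the parent string incrementally, then append the
--     # expression and all closing parentheses at once.
--     parts = path.split(".")
--     parent = parts[0]
--     opens = []
--     for field in parts[1:]:
--         opens.append(f'struct_update({parent}, "{field}" := ')
--         parent += "." + field
--     return "".join(opens) + expr + ")" * (len(parts) - 1)
-- ===== Notes on version B (the rewrite author's own statement) =====
-- stated objective: alternative
-- what changed: A builds the result by repeatedly wrapping the accumulator innermost-out, re-joining the path prefix at every depth; B makes one forward pass that emits each opening 'struct_update(parent, "field" := ' segment while extending the parent string incrementally, then concatenates the segments, the expression and all closing parentheses at once.
import Mathlib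
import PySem

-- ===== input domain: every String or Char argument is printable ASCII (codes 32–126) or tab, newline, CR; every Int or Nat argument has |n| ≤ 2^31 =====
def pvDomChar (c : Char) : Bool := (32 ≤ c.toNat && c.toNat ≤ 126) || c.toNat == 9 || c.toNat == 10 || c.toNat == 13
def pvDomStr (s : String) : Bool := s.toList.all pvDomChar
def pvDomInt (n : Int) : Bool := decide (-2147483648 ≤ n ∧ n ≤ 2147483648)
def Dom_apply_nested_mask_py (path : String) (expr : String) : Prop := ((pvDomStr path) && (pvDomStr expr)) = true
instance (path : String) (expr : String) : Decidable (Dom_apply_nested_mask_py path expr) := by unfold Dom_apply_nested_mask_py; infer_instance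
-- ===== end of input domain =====

-- B replaces A's repeated innermost-out wrapping (re-joining the prefix each round)
-- by one forward pass emitting the opening segments while extending the parent
-- incrementally, then appending the expression and all closing parens at once (objective: alternative).

-- ===== PORT A =====
def apply_nested_mask_py (path : String) (expr : String) : String :=
  -- parts = path.split("."): sep "." ≠ "" so split? is always `some`
  let parts := (PySem.Str.split? path ".").getD []
  if parts.length = 1 then expr
  else
    (PySem.List.pyRange ((parts.length : Int) - 1) 0 (-1)).foldl
      (fun updated depth =>
        let parent := PySem.Str.join "." (PySem.List.slice parts none (some depth))
        let field := PySem.List.pyGetD parts depth ""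
        "struct_update(" ++ parent ++ ", \"" ++ field ++ "\" := " ++ updated ++ ")")
      expr

-- ===== PORT B =====
def apply_nested_mask_py_alt (path : String) (expr : String) : String :=
  let parts := (PySem.Str.split? path ".").getD []
  -- parts[0]: split? never yields [], so the index is always in range
  let st := (parts.drop 1).foldl
      (fun (st : String × List String) field =>
        (st.1 ++ "." ++ field,
         st.2 ++ ["struct_update(" ++ st.1 ++ ", \"" ++ field ++ "\" := "]))
      (PySem.List.pyGetD parts 0 "", [])
  -- '")" * (len(parts) - 1)' ported via pyRepeat on the char list
  PySem.Str.join "" st.2 ++ expr ++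
    String.ofList (PySem.List.pyRepeat [')'] ((parts.length : Int) - 1))

-- ===== PRECONDITION & SPEC =====
def Spec_apply_nested_mask_py (path : String) (expr : String) (out : String) : Prop := out = apply_nested_mask_py_alt path expr
instance (path : String) (expr : String) (out : String) : Decidable (Spec_apply_nested_mask_py path expr out) := by unfold Spec_apply_nested_mask_py; infer_instance

-- ===== CLAIM (what is proved, stated in full; the proofs are below) =====
def Claim_equal_apply_nested_mask_py : Prop := ∀ (path : String) (expr : String), Dom_apply_nested_mask_py path expr → Spec_apply_nested_mask_py path expr (apply_nested_mask_py path expr)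

-- ===== LEMMAS AND PROOFS =====

/-- The nested struct_update expression, built outermost-first. -/
def specB (pj : String) : List String → String → String
  | [], e => e
  | f :: fs, e => "struct_update(" ++ pj ++ ", \"" ++ f ++ "\" := " ++ specB (pj ++ "." ++ f) fs e ++ ")"

/-- The opening segments B emits, with the parent extended as it goes. -/
def segsB (pj : String) : List String → List String
  | [] => []
  | f :: fs => ("struct_update(" ++ pj ++ ", \"" ++ f ++ "\" := ") :: segsB (pj ++ "." ++ f) fs

def closeN (m : Nat) : String := String.ofList (List.replicate m ')')

def extendP (pj : String) (fs : List String) : String :=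
  fs.foldl (fun a g => a ++ "." ++ g) pj

theorem join_empty_nil : PySem.Str.join "" [] = "" := rfl

theorem dot_eq : ("." : String) = String.ofList ['.'] := rfl

theorem ofList_dot_cons (J : List Char) : String.ofList ('.' :: J) = "." ++ String.ofList J := by
  rw [show ('.' :: J) = ['.'] ++ J from rfl, String.ofList_append, dot_eq]

theorem join_empty_cons (a : String) (l : List String) :
    PySem.Str.join "" (a :: l) = a ++ PySem.Str.join "" l := by
  cases l with
  | nil => simp [PySem.Str.join, PySem.Chars.join, List.intercalate]
  | cons b t => simp [PySem.Str.join, PySem.Chars.join_cons_cons]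

theorem join_dot_cons_cons (a b : String) (l : List String) :
    PySem.Str.join "." (a :: b :: l) = a ++ "." ++ PySem.Str.join "." (b :: l) := by
  simp [PySem.Str.join, PySem.Chars.join_cons_cons, String.ofList_append, ofList_dot_cons,
    String.append_assoc]

theorem join_dot_singleton (p : String) : PySem.Str.join "." [p] = p := by
  simp [PySem.Str.join, PySem.Chars.join, List.intercalate]

theorem closeN_succ (m : Nat) : closeN (m + 1) = closeN m ++ ")" := by
  have h : (")" : String) = String.ofList [')'] := rfl
  rw [closeN, closeN, h, ← String.ofList_append, List.replicate_succ']

theorem foldB_snd (fs : List String) : ∀ (pj : String) (acc : List String),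
    (fs.foldl
      (fun (st : String × List String) field =>
        (st.1 ++ "." ++ field,
         st.2 ++ ["struct_update(" ++ st.1 ++ ", \"" ++ field ++ "\" := "]))
      (pj, acc)).2 = acc ++ segsB pj fs := by
  induction fs with
  | nil => intro pj acc; simp [segsB]
  | cons f t ih => intro pj acc; simp [List.foldl_cons, ih, segsB]

theorem B_eq_spec (fs : List String) : ∀ (pj e : String),
    PySem.Str.join "" (segsB pj fs) ++ e ++ closeN fs.length = specB pj fs e := by
  induction fs with
  | nil => intro pj e; simp [segsB, specB, closeN, join_empty_nil]
  | cons f t ih =>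
    intro pj e
    rw [segsB, join_empty_cons, List.length_cons, closeN_succ, specB, ← ih (pj ++ "." ++ f) e]
    simp [String.append_assoc]

theorem spec_snoc (fs : List String) : ∀ (pj f e : String),
    specB pj (fs ++ [f]) e
      = specB pj fs ("struct_update(" ++ extendP pj fs ++ ", \"" ++ f ++ "\" := " ++ e ++ ")") := by
  induction fs with
  | nil => intro pj f e; simp [specB, extendP]
  | cons g t ih => intro pj f e; simp [specB, extendP, List.foldl_cons, ih, extendP]

theorem join_eq_extend (l : List String) : ∀ (p : String),
    PySem.Str.join "." (p :: l) = extendP p l := by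
  induction l with
  | nil => intro p; simp [join_dot_singleton, extendP]
  | cons g t ih =>
    intro p
    rw [join_dot_cons_cons]
    have h2 : extendP p (g :: t) = extendP (p ++ "." ++ g) t := by
      simp [extendP, List.foldl_cons]
    rw [h2, ← ih (p ++ "." ++ g)]
    cases t with
    | nil => simp [join_dot_singleton]
    | cons x r => rw [join_dot_cons_cons, join_dot_cons_cons]; simp [String.append_assoc]

theorem lemA (p : String) (rest : List String) : ∀ (m : Nat), m ≤ rest.length → ∀ (e : String),
    (PySem.List.pyRange (m : Int) 0 (-1)).foldl
      (fun updated depth =>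
        let parent := PySem.Str.join "." (PySem.List.slice (p :: rest) none (some depth))
        let field := PySem.List.pyGetD (p :: rest) depth ""
        "struct_update(" ++ parent ++ ", \"" ++ field ++ "\" := " ++ updated ++ ")")
      e = specB p (rest.take m) e := by
  intro m
  induction m with
  | zero =>
    intro _ e
    rw [PySem.List.pyRange_neg_one_eq_nil (by norm_num)]
    simp [specB]
  | succ m ih =>
    intro hm e
    have hm' : m ≤ rest.length := Nat.le_of_succ_le hm
    have hmlt : m < rest.length := hm
    rw [PySem.List.pyRange_neg_one_cons (by exact_mod_cast Nat.succ_pos m)]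
    have hc : ((m + 1 : Nat) : Int) - 1 = (m : Int) := by push_cast; ring
    rw [List.foldl_cons, hc, ih hm']
    -- identify the wrapped accumulator
    have hslice : PySem.List.slice (p :: rest) none (some ((m + 1 : Nat) : Int))
        = p :: rest.take m := by
      rw [PySem.List.slice_to _ (by positivity)]
      simp
    have hget : PySem.List.pyGetD (p :: rest) ((m + 1 : Nat) : Int) "" = rest[m] := by
      rw [PySem.List.pyGetD_natCast]
      simp [List.getD, List.getElem?_cons_succ, List.getElem?_eq_getElem hmlt]
    simp only [hslice, hget, join_eq_extend]
    rw [← spec_snoc]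
    have : rest.take m ++ [rest[m]] = rest.take (m + 1) := by
      rw [List.take_add_one, List.getElem?_eq_getElem hmlt]; rfl
    rw [this]

theorem main_eq (path expr : String) :
    apply_nested_mask_py path expr = apply_nested_mask_py_alt path expr := by
  unfold apply_nested_mask_py apply_nested_mask_py_alt
  generalize (PySem.Str.split? path ".").getD [] = parts
  cases parts with
  | nil =>
    simp only [List.length_nil]
    rw [if_neg (by norm_num)]
    rw [show ((0 : Nat) : Int) - 1 = (-1 : Int) by norm_num,
        PySem.List.pyRange_neg_one_eq_nil (by norm_num)]
    simp [PySem.List.pyRepeat, join_empty_nil]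
  | cons p rest =>
    have hB :
        (let st := ((p :: rest).drop 1).foldl
            (fun (st : String × List String) field =>
              (st.1 ++ "." ++ field,
               st.2 ++ ["struct_update(" ++ st.1 ++ ", \"" ++ field ++ "\" := "]))
            (PySem.List.pyGetD (p :: rest) 0 "", []);
          PySem.Str.join "" st.2 ++ expr ++
            String.ofList (PySem.List.pyRepeat [')'] (((p :: rest).length : Int) - 1)))
        = specB p rest expr := by
      have hp0 : PySem.List.pyGetD (p :: rest) 0 "" = p := by
        rw [show (0 : Int) = ((0 : Nat) : Int) from rfl, PySem.List.pyGetD_natCast]; rfl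
      have hlen : (((p :: rest).length : Int) - 1) = (rest.length : Int) := by
        simp
      have hrep : String.ofList (PySem.List.pyRepeat [')'] (rest.length : Int))
          = closeN rest.length := by
        rw [PySem.List.pyRepeat_singleton, closeN]; simp
      simp only [List.drop_one, List.tail_cons, hp0, hlen, hrep]
      rw [foldB_snd, List.nil_append, B_eq_spec]
    rw [hB]
    by_cases h1 : rest = []
    · subst h1; rw [if_pos (by simp)]; simp [specB]
    · rw [if_neg (by simp [h1])]
      have hlen : (((p :: rest).length : Int) - 1) = ((rest.length : Nat) : Int) := by
        simp
      rw [hlen, lemA p rest rest.length (le_refl _) expr, List.take_length]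

-- ===== VERDICT (by name: the statement is the Claim_ definition above) =====
theorem apply_nested_mask_py_spec : Claim_equal_apply_nested_mask_py := by
  intro path expr _
  unfold Spec_apply_nested_mask_py
  exact main_eq path expr
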